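-- pv_equiv track=rewrite | github.com/MikeChile13/Leet_Codes | 2610-closest-prime-numbers-in-range/2610-closest-prime-numbers-in-range.py | closestPrimes
-- ===== SOURCE A (Python) =====
-- from typing import List
--
-- def closestPrimes(left: int, right: int) -> List[int]:
--     isPrime = [True] *(right + 1)
--     isPrime[0] = isPrime[1] = False
--     primeNumbers = []
--
--     num1,num2 = left - 1,right + 1
--
--     for i in range(right + 1):
--         if isPrime[i]:
--             if i >= left:
--                 primeNumbers.append(i)
--                 if len(primeNumbers) > 1:
--                     diff = primeNumbers[-1] - primeNumbers[-2]
--                     if diff < 3: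
--                         return primeNumbers[-2:]
--                     if diff < num2 - num1:
--                         num1,num2 = primeNumbers[-2:]
--
--             for j in range(i * i, right + 1, i):
--                 isPrime[j] = False
--
--     return [-1, -1] if num1 < left or num2 > right else [num1, num2]
-- ===== SOURCE B (Python) =====
-- from typing import List
--
-- def closestPrimes(left: int, right: int) -> List[int]:
--     # Sieve-free: stream k over [left, right], test each by trial division,
--     # keep only the previous prime and the best (first minimal-gap) pair.
--     def is_prime(k: int) -> bool:
--         if k < 2:
--             return False
--         d = 2
--         while d * d <= k:
--             if k % d == 0:
--                 return False
--             d += 1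
--         return True
--
--     prev = None
--     best = None
--     for k in range(max(left, 2), right + 1):
--         if is_prime(k):
--             if prev is not None and (best is None or k - prev < best[1] - best[0]):
--                 best = (prev, k)
--             prev = k
--     return [best[0], best[1]] if best is not None else [-1, -1]
-- ===== Notes on version B (the rewrite author's own statement) =====
-- stated objective: alternative
-- what changed: A builds a Sieve of Eratosthenes boolean array over [0, right] and fuses marking, prime collection into a list, and sentinel-pair tracking with an early twin-gap return into one loop; B drops the sieve and the list entirely: it streams k over [max(left,2), right], tests each k by trial division, and keeps only the previous prime and the best pair as an Option accumulator (no array, O(1) extra space, trial division instead of sieving).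
import Mathlib
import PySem

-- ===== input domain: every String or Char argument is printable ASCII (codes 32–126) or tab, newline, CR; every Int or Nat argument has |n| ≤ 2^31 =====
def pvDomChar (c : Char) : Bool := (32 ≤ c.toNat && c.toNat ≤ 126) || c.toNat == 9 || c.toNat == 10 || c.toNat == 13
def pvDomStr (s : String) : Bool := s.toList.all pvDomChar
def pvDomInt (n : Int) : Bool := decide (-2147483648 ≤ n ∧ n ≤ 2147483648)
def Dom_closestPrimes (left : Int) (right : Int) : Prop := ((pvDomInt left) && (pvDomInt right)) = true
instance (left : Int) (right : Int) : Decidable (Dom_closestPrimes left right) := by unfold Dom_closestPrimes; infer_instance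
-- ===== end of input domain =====

-- B replaces A's fused sieve/collect/track loop by a sieve-free stream over [left,right] with
-- per-number trial division and an Option (prev, best) accumulator; objective: alternative
-- (no array, O(1) extra space, at the cost of trial division), same result.


-- ===== PORT A =====
-- inner marking loop 'for j in range(i * i, right + 1, i): isPrime[j] = False'
def pvMark (n : Nat) (a : Array Bool) (i : Nat) : Array Bool :=
  (PySem.List.pyRange ((i : Int) * (i : Int)) (n : Int) (i : Int)).foldl
    (fun a j => a.setIfInBounds j.toNat false) a

-- A's single fused loop: sieve marking, prime collection, best-pair tracking, early twin return
def pvALoop (left right : Int) (n : Nat) :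
    List Nat → Array Bool → List Int → Int → Int → List Int
  | [], _, _, n1, n2 => if n1 < left ∨ right < n2 then [-1, -1] else [n1, n2]
  | i :: is, a, primes, n1, n2 =>
    if a.getD i false then
      if left ≤ (i : Int) then
        let primes' := primes ++ [(i : Int)]
        if 1 < primes'.length then
          let diff := PySem.List.pyGetD primes' (-1) 0 - PySem.List.pyGetD primes' (-2) 0
          if diff < 3 then
            PySem.List.slice primes' (some (-2)) none
          else if diff < n2 - n1 then
            pvALoop left right n is (pvMark n a i) primes'
              (PySem.List.pyGetD primes' (-2) 0) (PySem.List.pyGetD primes' (-1) 0)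
          else
            pvALoop left right n is (pvMark n a i) primes' n1 n2
        else
          pvALoop left right n is (pvMark n a i) primes' n1 n2
      else
        pvALoop left right n is (pvMark n a i) primes n1 n2
    else
      pvALoop left right n is a primes n1 n2

def closestPrimes (left : Int) (right : Int) : List Int :=
  let n := (right + 1).toNat
  let isPrime := ((Array.replicate n true).setIfInBounds 0 false).setIfInBounds 1 false
  pvALoop left right n (List.range' 0 n) isPrime [] (left - 1) (right + 1)

-- ===== PORT B =====
-- 'd = 2; while d * d <= k: if k % d == 0: return False; d += 1; return True' (on k.toNat)
def pvTrialNat (k : Nat) (d : Nat) : Bool :=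
  if _h : d * d ≤ k then
    if k % d = 0 then false else pvTrialNat k (d + 1)
  else true
termination_by k + 2 - d
decreasing_by
  have hd : d = 0 ∨ d ≤ d * d := by
    rcases Nat.eq_zero_or_pos d with h | h
    · exact Or.inl h
    · exact Or.inr (Nat.le_mul_of_pos_left d h)
  omega

-- 'if k < 2: return False' then the trial loop from d = 2
def pvIsPrime (k : Int) : Bool := if k < 2 then false else pvTrialNat k.toNat 2

-- 'for k in range(max(left, 2), right + 1): if is_prime(k): …' with the (prev, best) accumulator
def pvBLoop : List Int → Option Int → Option (Int × Int) → Option (Int × Int)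
  | [], _, best => best
  | k :: ks, prev, best =>
    if pvIsPrime k then
      pvBLoop ks (some k)
        (match prev with
         | none => best
         | some p =>
           match best with
           | none => some (p, k)
           | some b => if k - p < b.2 - b.1 then some (p, k) else some b)
    else
      pvBLoop ks prev best

def closestPrimes_alt (left : Int) (right : Int) : List Int :=
  match pvBLoop (PySem.List.pyRange (max left 2) (right + 1) 1) none none with
  | some b => [b.1, b.2]
  | none => [-1, -1]

-- ===== PRECONDITION & SPEC =====
-- Python A raises IndexError when right ≤ 0 (the sieve list is too short for isPrime[1] = False)
def Pre_closestPrimes (left : Int) (right : Int) : Prop := 1 ≤ right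
instance (left : Int) (right : Int) : Decidable (Pre_closestPrimes left right) := by
  unfold Pre_closestPrimes; infer_instance
def pvWitness_closestPrimes : Int × Int := (10, 19)

def Spec_closestPrimes (left : Int) (right : Int) (out : List Int) : Prop :=
  out = closestPrimes_alt left right
instance (left : Int) (right : Int) (out : List Int) : Decidable (Spec_closestPrimes left right out) := by
  unfold Spec_closestPrimes; infer_instance

-- ===== CLAIM (what is proved, stated in full; the proofs are below) =====
def Claim_equal_closestPrimes : Prop := ∀ (left : Int) (right : Int),
  Dom_closestPrimes left right → Pre_closestPrimes left right →
  Spec_closestPrimes left right (closestPrimes left right)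

-- ===== LEMMAS AND PROOFS =====

-- ----- B's trial division decides primality -----
lemma pvTrialNat_iff_aux : ∀ (m k d : Nat), k + 2 - d = m → 2 ≤ d →
    (pvTrialNat k d = true ↔ ∀ e, d ≤ e → e * e ≤ k → ¬ e ∣ k) := by
  intro m
  induction m with
  | zero =>
    intro k d hm hd
    rw [pvTrialNat]
    have hnot : ¬ d * d ≤ k := by
      intro h
      have : d ≤ d * d := Nat.le_mul_of_pos_left d (by omega)
      omega
    simp only [hnot]
    constructor
    · intro _ e he hsq hdvd
      have : d * d ≤ e * e := Nat.mul_le_mul he he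
      omega
    · intro _; trivial
  | succ m ih =>
    intro k d hm hd
    rw [pvTrialNat]
    by_cases hle : d * d ≤ k
    · simp only [hle, dif_pos]
      by_cases hmod : k % d = 0
      · simp only [hmod, if_pos]
        constructor
        · intro h; exact absurd h (by simp)
        · intro h
          exact absurd (Nat.dvd_of_mod_eq_zero hmod) (h d le_rfl hle)
      · simp only [hmod, if_neg, not_false_iff]
        have hdk : d ≤ d * d := Nat.le_mul_of_pos_left d (by omega)
        rw [ih k (d + 1) (by omega) (by omega)]
        constructor
        · intro h e he hsq hdvd
          rcases Nat.lt_or_ge d e with h' | h'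
          · exact h e (by omega) hsq hdvd
          · have : e = d := by omega
            subst this
            exact hmod (by obtain ⟨c, rfl⟩ := hdvd; simp)
        · intro h e he hsq hdvd
          exact h e (by omega) hsq hdvd
    · simp only [hle]
      constructor
      · intro _ e he hsq hdvd
        have : d * d ≤ e * e := Nat.mul_le_mul he he
        omega
      · intro _; trivial

lemma pvIsPrime_iff (k : Int) :
    pvIsPrime k = true ↔ 2 ≤ k ∧ Nat.Prime k.toNat := by
  unfold pvIsPrime
  by_cases hk : k < 2
  · simp [hk]
  · push_neg at hk
    have h2 : 2 ≤ k.toNat := by omega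
    rw [if_neg (by omega), pvTrialNat_iff_aux (k.toNat + 2 - 2) k.toNat 2 rfl le_rfl]
    constructor
    · intro h
      refine ⟨hk, ?_⟩
      by_contra hnp
      have hp := Nat.minFac_prime (show k.toNat ≠ 1 by omega)
      have hsq : k.toNat.minFac ^ 2 ≤ k.toNat := Nat.minFac_sq_le_self (by omega) hnp
      exact h k.toNat.minFac hp.two_le (by rw [pow_two] at hsq; exact hsq) (Nat.minFac_dvd _)
    · rintro ⟨-, hp⟩ e he hsq hdvd
      rcases (hp.eq_one_or_self_of_dvd e hdvd) with h1 | h1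
      · omega
      · subst h1; nlinarith

-- ----- list model of A's array sieve -----
def pvMarkL (n : Nat) (a : List Bool) (i : Nat) : List Bool :=
  (PySem.List.pyRange ((i : Int) * (i : Int)) (n : Int) (i : Int)).foldl
    (fun a j => a.set j.toNat false) a

def pvALoopL (left right : Int) (n : Nat) :
    List Nat → List Bool → List Int → Int → Int → List Int
  | [], _, _, n1, n2 => if n1 < left ∨ right < n2 then [-1, -1] else [n1, n2]
  | i :: is, a, primes, n1, n2 =>
    if a.getD i false then
      if left ≤ (i : Int) then
        let primes' := primes ++ [(i : Int)]
        if 1 < primes'.length then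
          let diff := PySem.List.pyGetD primes' (-1) 0 - PySem.List.pyGetD primes' (-2) 0
          if diff < 3 then
            PySem.List.slice primes' (some (-2)) none
          else if diff < n2 - n1 then
            pvALoopL left right n is (pvMarkL n a i) primes'
              (PySem.List.pyGetD primes' (-2) 0) (PySem.List.pyGetD primes' (-1) 0)
          else
            pvALoopL left right n is (pvMarkL n a i) primes' n1 n2
        else
          pvALoopL left right n is (pvMarkL n a i) primes' n1 n2
      else
        pvALoopL left right n is (pvMarkL n a i) primes n1 n2
    else
      pvALoopL left right n is a primes n1 n2

lemma array_getD_toList (a : Array Bool) (i : Nat) (d : Bool) :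
    a.getD i d = a.toList.getD i d := by
  unfold Array.getD
  split
  · rw [List.getD_eq_getElem _ _ (by simpa)]
    simp
  · rw [List.getD_eq_default _ _ (by simp; omega)]

lemma pvMark_toList (n : Nat) (a : Array Bool) (i : Nat) :
    (pvMark n a i).toList = pvMarkL n a.toList i := by
  unfold pvMark pvMarkL
  generalize PySem.List.pyRange ((i : Int) * (i : Int)) (n : Int) (i : Int) = js
  induction js generalizing a with
  | nil => rfl
  | cons j js ih => simp [List.foldl_cons, ih, Array.toList_setIfInBounds]

lemma pvALoop_toList (left right : Int) (n : Nat) :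
    ∀ (is : List Nat) (a : Array Bool) (primes : List Int) (n1 n2 : Int),
    pvALoop left right n is a primes n1 n2 = pvALoopL left right n is a.toList primes n1 n2 := by
  intro is
  induction is with
  | nil => intro a primes n1 n2; rfl
  | cons i is ih =>
    intro a primes n1 n2
    simp only [pvALoop, pvALoopL, array_getD_toList]
    by_cases hc : a.toList.getD i false = true
    · simp only [hc, if_true]
      by_cases hl : left ≤ (i : Int)
      · simp only [if_pos hl]
        by_cases hlen : 1 < (primes ++ [(i : Int)]).length
        · simp only [hlen, if_true]
          by_cases hd3 : PySem.List.pyGetD (primes ++ [(i : Int)]) (-1) 0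
              - PySem.List.pyGetD (primes ++ [(i : Int)]) (-2) 0 < 3
          · simp only [hd3, if_true]
          · simp only [hd3, if_false]
            by_cases hup : PySem.List.pyGetD (primes ++ [(i : Int)]) (-1) 0
                - PySem.List.pyGetD (primes ++ [(i : Int)]) (-2) 0 < n2 - n1
            · simp only [hup, if_true]
              rw [ih, pvMark_toList]
            · simp only [hup, if_false]
              rw [ih, pvMark_toList]
        · simp only [hlen, if_false]
          rw [ih, pvMark_toList]
      · simp only [if_neg hl]
        rw [ih, pvMark_toList]
    · have hcf : a.toList.getD i false = false := by
        cases hb : a.toList.getD i false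
        · rfl
        · exact absurd hb hc
      simp only [hcf, Bool.false_eq_true, if_false]
      exact ih a primes n1 n2

-- ----- the sieve computes primality -----
def pvStep (n : Nat) (a : List Bool) (i : Nat) : List Bool :=
  if a.getD i false then pvMarkL n a i else a
def pvInit (n : Nat) : List Bool := ((List.replicate n true).set 0 false).set 1 false
def pvPartial (n i : Nat) : List Bool := (List.range' 0 i).foldl (pvStep n) (pvInit n)
-- 'k still unmarked after sieve steps 0..i-1'
def pvGood (i k : Nat) : Prop := 2 ≤ k ∧ ∀ p, p < i → Nat.Prime p → p ∣ k → ¬ p * p ≤ k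

lemma getD_set_false (a : List Bool) (m k : Nat) :
    (a.set m false).getD k false = if m = k ∧ k < a.length then false else a.getD k false := by
  simp only [List.getD_eq_getElem?_getD, List.getElem?_set]
  split_ifs with h1 h2 h3 h3 <;> simp_all

lemma getD_foldl_set (js : List Int) (a : List Bool) (k : Nat) :
    (js.foldl (fun a j => a.set j.toNat false) a).getD k false
      = if (∃ j ∈ js, j.toNat = k) ∧ k < a.length then false else a.getD k false := by
  induction js generalizing a with
  | nil => simp
  | cons j js ih =>
    simp only [List.foldl_cons]
    rw [ih, getD_set_false]
    simp only [List.length_set]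
    by_cases hk : k < a.length
    · by_cases hj : j.toNat = k
      · simp [hj, hk]
      · by_cases hex : ∃ x ∈ js, x.toNat = k
        · simp [hj, hex, hk]
        · simp [hj, hex, hk]
    · simp [hk]

lemma getD_pvMarkL (n : Nat) (a : List Bool) (i k : Nat) (hi : 2 ≤ i) (hlen : a.length = n) :
    (pvMarkL n a i).getD k false
      = if i ∣ k ∧ i * i ≤ k ∧ k < n then false else a.getD k false := by
  unfold pvMarkL
  rw [getD_foldl_set, hlen]
  have hipos : (0 : Int) < (i : Int) := by exact_mod_cast Nat.lt_of_lt_of_le (by norm_num) hi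
  have hii : (i : Int) ∣ (i : Int) * (i : Int) := Dvd.intro _ rfl
  by_cases h : i ∣ k ∧ i * i ≤ k ∧ k < n
  · rw [if_pos h, if_pos]
    refine ⟨⟨(k : Int), ?_, by simp⟩, h.2.2⟩
    rw [PySem.List.mem_pyRange_iff_of_pos hipos]
    refine ⟨by exact_mod_cast h.2.1, by exact_mod_cast h.2.2, ?_⟩
    exact dvd_sub (by exact_mod_cast h.1) hii
  · rw [if_neg h, if_neg]
    rintro ⟨⟨j, hj, hjk⟩, hkn⟩
    rw [PySem.List.mem_pyRange_iff_of_pos hipos] at hj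
    obtain ⟨hj1, hj2, hj3⟩ := hj
    have hj0 : (0 : Int) ≤ j := le_trans (by positivity) hj1
    have hjeq : j = (k : Int) := by omega
    subst hjeq
    have hd : (i : Int) ∣ (k : Int) := by
      have := dvd_add hj3 hii
      simpa using this
    exact h ⟨by exact_mod_cast hd, by exact_mod_cast hj1, hkn⟩

lemma length_foldl_set (js : List Int) (a : List Bool) :
    (js.foldl (fun a j => a.set j.toNat false) a).length = a.length := by
  induction js generalizing a with
  | nil => rfl
  | cons j js ih => simp [List.foldl_cons, ih]

lemma length_pvMarkL (n : Nat) (a : List Bool) (i : Nat) :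
    (pvMarkL n a i).length = a.length := length_foldl_set _ _

lemma pvPartial_succ (n i : Nat) : pvPartial n (i + 1) = pvStep n (pvPartial n i) i := by
  unfold pvPartial
  rw [List.range'_concat]
  simp [List.foldl_append]

lemma length_pvPartial (n i : Nat) : (pvPartial n i).length = n := by
  induction i with
  | zero => simp [pvPartial, pvInit]
  | succ i ih =>
    rw [pvPartial_succ]
    unfold pvStep
    split
    · rw [length_pvMarkL, ih]
    · exact ih

lemma pvGood_self_iff (i : Nat) : pvGood i i ↔ Nat.Prime i := by
  constructor
  · rintro ⟨h2, hall⟩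
    by_contra hnp
    have hp := Nat.minFac_prime (show i ≠ 1 by omega)
    have hsq : i.minFac ^ 2 ≤ i := Nat.minFac_sq_le_self (by omega) hnp
    rw [pow_two] at hsq
    have h2p := hp.two_le
    have hlt : i.minFac < i := by nlinarith
    exact hall i.minFac hlt hp (Nat.minFac_dvd i) hsq
  · intro hp
    refine ⟨hp.two_le, fun p hlt hpp hdvd hsq => ?_⟩
    rcases hp.eq_one_or_self_of_dvd p hdvd with h | h
    · exact absurd h (by have := hpp.two_le; omega)
    · omega

lemma pvPartial_getD (n : Nat) (h2 : 2 ≤ n) :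
    ∀ i k : Nat, i ≤ n → k < n →
    ((pvPartial n i).getD k false = true ↔ pvGood i k) := by
  intro i
  induction i with
  | zero =>
    intro k _ hk
    show ((pvInit n).getD k false = true ↔ pvGood 0 k)
    unfold pvInit
    rw [getD_set_false, getD_set_false]
    simp only [List.length_set, List.length_replicate]
    unfold pvGood
    by_cases h0 : k = 0
    · simp [h0]; omega
    · by_cases h1 : k = 1
      · simp [h1]; omega
      · rw [if_neg (by omega), if_neg (by omega), List.getD_replicate _ hk]
        simp; omega
  | succ i ih =>
    intro k hi hk
    have hin : i < n := by omega
    rw [pvPartial_succ]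
    unfold pvStep
    by_cases hc : (pvPartial n i).getD i false = true
    · have hip : Nat.Prime i := (pvGood_self_iff i).1 ((ih i (by omega) hin).1 hc)
      rw [if_pos hc, getD_pvMarkL n _ i k hip.two_le (length_pvPartial n i)]
      by_cases hm : i ∣ k ∧ i * i ≤ k ∧ k < n
      · rw [if_pos hm]
        simp only [Bool.false_eq_true, false_iff]
        rintro ⟨hh2, hall⟩
        exact hall i (by omega) hip hm.1 hm.2.1
      · rw [if_neg hm, ih k (by omega) hk]
        constructor
        · rintro ⟨hh2, hall⟩
          refine ⟨hh2, fun p hplt hpp hpd hps => ?_⟩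
          rcases Nat.lt_succ_iff_lt_or_eq.1 hplt with h | h
          · exact hall p h hpp hpd hps
          · subst h
            exact hm ⟨hpd, hps, hk⟩
        · rintro ⟨hh2, hall⟩
          exact ⟨hh2, fun p hplt hpp hpd => hall p (by omega) hpp hpd⟩
    · have hnp : ¬ Nat.Prime i := fun hp =>
        hc ((ih i (by omega) hin).2 ((pvGood_self_iff i).2 hp))
      rw [if_neg hc, ih k (by omega) hk]
      constructor
      · rintro ⟨hh2, hall⟩
        refine ⟨hh2, fun p hplt hpp hpd hps => ?_⟩
        rcases Nat.lt_succ_iff_lt_or_eq.1 hplt with h | h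
        · exact hall p h hpp hpd hps
        · subst h; exact hnp hpp
      · rintro ⟨hh2, hall⟩
        exact ⟨hh2, fun p hplt hpp hpd => hall p (by omega) hpp hpd⟩

lemma pvPartial_getD_self (n i : Nat) (h2 : 2 ≤ n) (hi : i < n) :
    ((pvPartial n i).getD i false = true ↔ Nat.Prime i) := by
  rw [pvPartial_getD n h2 i i (by omega) hi, pvGood_self_iff]

-- ----- A's loop, re-read over the list of collected primes -----
def pvA3 (left right : Int) : List Int → List Int → Int → Int → List Int
  | [], _, n1, n2 => if n1 < left ∨ right < n2 then [-1, -1] else [n1, n2]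
  | k :: ks, primes, n1, n2 =>
    let primes' := primes ++ [k]
    if 1 < primes'.length then
      let diff := PySem.List.pyGetD primes' (-1) 0 - PySem.List.pyGetD primes' (-2) 0
      if diff < 3 then
        PySem.List.slice primes' (some (-2)) none
      else if diff < n2 - n1 then
        pvA3 left right ks primes' (PySem.List.pyGetD primes' (-2) 0) (PySem.List.pyGetD primes' (-1) 0)
      else
        pvA3 left right ks primes' n1 n2
    else
      pvA3 left right ks primes' n1 n2

def pvCond (left : Int) (k : Nat) : Bool := decide (Nat.Prime k ∧ left ≤ (k : Int))

lemma pvALoop_eq_pvA3 (left right : Int) (n : Nat) (h2 : 2 ≤ n) :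
    ∀ (m i : Nat) (primes : List Int) (n1 n2 : Int), i + m = n →
    pvALoopL left right n (List.range' i m) (pvPartial n i) primes n1 n2
      = pvA3 left right
          ((List.range' i m).filterMap
            (fun k => if pvCond left k then some ((k : Int)) else none))
          primes n1 n2 := by
  intro m
  induction m with
  | zero =>
    intro i primes n1 n2 _
    simp [pvALoopL, pvA3]
  | succ m ih =>
    intro i primes n1 n2 hi
    rw [List.range'_succ]
    have hin : i < n := by omega
    have hgd := pvPartial_getD_self n i h2 hin
    by_cases hp : Nat.Prime i
    · have hct : (pvPartial n i).getD i false = true := hgd.2 hp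
      have hmark : pvMarkL n (pvPartial n i) i = pvPartial n (i + 1) := by
        rw [pvPartial_succ]; unfold pvStep; rw [if_pos hct]
      by_cases hl : left ≤ (i : Int)
      · have hcond : pvCond left i = true := by simp [pvCond, hp, hl]
        simp only [pvALoopL, hct, if_true, if_pos hl, List.filterMap_cons, hcond, pvA3]
        by_cases hlen : 1 < (primes ++ [(i : Int)]).length
        · simp only [hlen, if_true]
          by_cases hd3 : PySem.List.pyGetD (primes ++ [(i : Int)]) (-1) 0
              - PySem.List.pyGetD (primes ++ [(i : Int)]) (-2) 0 < 3
          · simp only [hd3, if_true]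
          · simp only [hd3, if_false]
            by_cases hup : PySem.List.pyGetD (primes ++ [(i : Int)]) (-1) 0
                - PySem.List.pyGetD (primes ++ [(i : Int)]) (-2) 0 < n2 - n1
            · simp only [hup, if_true]
              rw [hmark]
              exact ih (i + 1) _ _ _ (by omega)
            · simp only [hup, if_false]
              rw [hmark]
              exact ih (i + 1) _ _ _ (by omega)
        · simp only [hlen, if_false]
          rw [hmark]
          exact ih (i + 1) _ _ _ (by omega)
      · have hcond : pvCond left i = false := by simp [pvCond, hl]
        simp only [pvALoopL, hct, if_true, if_neg hl, List.filterMap_cons, hcond]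
        rw [hmark]
        exact ih (i + 1) _ _ _ (by omega)
    · have hcf : (pvPartial n i).getD i false = false := by
        cases hb : (pvPartial n i).getD i false
        · rfl
        · exact absurd (hgd.1 hb) hp
      have hcond : pvCond left i = false := by simp [pvCond, hp]
      have hstep : pvPartial n i = pvPartial n (i + 1) := by
        rw [pvPartial_succ]; unfold pvStep; rw [hcf]; simp
      simp only [pvALoopL, hcf, Bool.false_eq_true, if_false, List.filterMap_cons, hcond]
      rw [hstep]
      exact ih (i + 1) _ _ _ (by omega)

-- ----- B's loop over the surviving (prime) elements -----
def pvB3 : List Int → Option Int → Option (Int × Int) → Option (Int × Int)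
  | [], _, best => best
  | k :: ks, prev, best =>
    pvB3 ks (some k)
      (match prev with
       | none => best
       | some p =>
         match best with
         | none => some (p, k)
         | some b => if k - p < b.2 - b.1 then some (p, k) else some b)

lemma pvBLoop_eq_pvB3 :
    ∀ (l : List Int) (prev : Option Int) (best : Option (Int × Int)),
    pvBLoop l prev best = pvB3 (l.filter (fun k => pvIsPrime k)) prev best := by
  intro l
  induction l with
  | nil => intro prev best; rfl
  | cons k ks ih =>
    intro prev best
    by_cases h : pvIsPrime k = true
    · rw [List.filter_cons_of_pos h]
      simp only [pvBLoop, h, if_true, pvB3]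
      exact ih _ _
    · rw [List.filter_cons_of_neg h]
      simp only [pvBLoop, h, Bool.false_eq_true, if_false]
      exact ih _ _

-- ----- the two prime lists coincide -----
lemma filterMap_if_eq_map_filter (c : Nat → Bool) (l : List Nat) :
    l.filterMap (fun k => if c k then some ((k : Int)) else none)
      = List.map (fun k : Nat => (k : Int)) (l.filter c) := by
  induction l with
  | nil => rfl
  | cons a l ih =>
    by_cases h : c a
    · rw [List.filter_cons_of_pos h, List.filterMap_cons]
      simp [h, ih]
    · rw [List.filter_cons_of_neg h, List.filterMap_cons]
      simp [h, ih]

lemma sorted_eq_of_mem_iff (l1 l2 : List Int) (h1 : l1.Pairwise (· < ·))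
    (h2 : l2.Pairwise (· < ·)) (hm : ∀ x, x ∈ l1 ↔ x ∈ l2) : l1 = l2 :=
  List.eq_of_perm_of_sorted (fun a b _ _ hab hba => absurd hab (lt_asymm hba)) h1 h2
    ((List.perm_ext_iff_of_nodup (h1.imp ne_of_lt) (h2.imp ne_of_lt)).2 hm)

lemma pairwise_A_list (left right : Int) :
    ((List.range' 0 (right + 1).toNat).filterMap
      (fun k => if pvCond left k then some ((k : Int)) else none)).Pairwise (· < ·) := by
  rw [filterMap_if_eq_map_filter, ← List.range_eq_range', List.pairwise_map]
  refine (List.pairwise_lt_range.filter _).imp ?_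
  intro a b hab
  exact_mod_cast hab

lemma mem_A_list (left right : Int) (h : 1 ≤ right) :
    ∀ x ∈ (List.range' 0 (right + 1).toNat).filterMap
        (fun k => if pvCond left k then some ((k : Int)) else none),
      2 ≤ x ∧ Nat.Prime x.toNat ∧ left ≤ x ∧ x ≤ right := by
  rw [filterMap_if_eq_map_filter, ← List.range_eq_range']
  intro x hx
  rw [List.mem_map] at hx
  obtain ⟨k, hk, rfl⟩ := hx
  rw [List.mem_filter, List.mem_range] at hk
  obtain ⟨hkn, hc⟩ := hk
  simp only [pvCond, decide_eq_true_eq] at hc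
  obtain ⟨hpk, hlk⟩ := hc
  have h2k := hpk.two_le
  exact ⟨by exact_mod_cast h2k, by simpa using hpk, hlk, by omega⟩

lemma lists_eq (left right : Int) (h : 1 ≤ right) :
    (PySem.List.pyRange (max left 2) (right + 1) 1).filter (fun k => pvIsPrime k)
      = (List.range' 0 (right + 1).toNat).filterMap
          (fun k => if pvCond left k then some ((k : Int)) else none) := by
  refine sorted_eq_of_mem_iff _ _
    ((PySem.List.pairwise_lt_pyRange_one (max left 2) (right + 1)).filter _)
    (pairwise_A_list left right) ?_
  intro x
  rw [filterMap_if_eq_map_filter, ← List.range_eq_range']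
  rw [List.mem_filter, PySem.List.mem_pyRange_one, List.mem_map]
  constructor
  · rintro ⟨⟨hlx, hxr⟩, hpx⟩
    have hl2 : left ≤ x := le_trans (le_max_left _ _) hlx
    obtain ⟨h2x, hpr⟩ := (pvIsPrime_iff x).1 hpx
    refine ⟨x.toNat, ?_, by omega⟩
    rw [List.mem_filter, List.mem_range]
    refine ⟨by omega, ?_⟩
    simp only [pvCond, decide_eq_true_eq]
    exact ⟨hpr, by omega⟩
  · rintro ⟨k, hk, rfl⟩
    rw [List.mem_filter, List.mem_range] at hk
    obtain ⟨hkn, hc⟩ := hk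
    simp only [pvCond, decide_eq_true_eq] at hc
    obtain ⟨hpk, hlk⟩ := hc
    have h2k := hpk.two_le
    refine ⟨⟨max_le hlk (by exact_mod_cast h2k), by omega⟩,
      (pvIsPrime_iff _).2 ⟨by exact_mod_cast h2k, by simpa using hpk⟩⟩

-- ----- no consecutive integers above 2 are both prime -----
lemma no_twin_succ (x : Int) (h3 : 3 ≤ x) (hp : Nat.Prime x.toNat)
    (hq : Nat.Prime (x + 1).toNat) : False := by
  have hb : (x + 1).toNat = x.toNat + 1 := by omega
  rw [hb] at hq
  rcases Nat.even_or_odd x.toNat with he | ho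
  · have := hp.even_iff.1 he
    omega
  · have heven : Even (x.toNat + 1) := by
      rcases ho with ⟨m, hm⟩
      exact ⟨m + 1, by omega⟩
    have := hq.even_iff.1 heven
    omega

lemma pvB3_stuck :
    ∀ (L : List Int) (q : Int) (b : Int × Int), 3 ≤ q → Nat.Prime q.toNat →
    b.2 - b.1 ≤ 2 → (∀ x ∈ L, q < x ∧ Nat.Prime x.toNat) → L.Pairwise (· < ·) →
    pvB3 L (some q) (some b) = some b := by
  intro L
  induction L with
  | nil => intro q b _ _ _ _ _; rfl
  | cons x L ih =>
    intro q b hq3 hqp hgap hall hpw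
    obtain ⟨hqx, hxp⟩ := hall x (List.mem_cons_self)
    have hcond : ¬ (x - q < b.2 - b.1) := by
      intro hlt
      have hx1 : x = q + 1 := by omega
      rw [hx1] at hxp
      exact no_twin_succ q hq3 hqp hxp
    have hpw' := List.pairwise_cons.1 hpw
    simp only [pvB3, if_neg hcond]
    exact ih x b (by omega) hxp hgap
      (fun y hy => ⟨hpw'.1 y hy, (hall y (List.mem_cons_of_mem _ hy)).2⟩) hpw'.2

-- ----- the accumulator equivalence -----
def pvFinish : Option (Int × Int) → List Int
  | some b => [b.1, b.2]
  | none => [-1, -1]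

lemma pvA3_eq_pvB3 (left right : Int) :
    ∀ (L ps : List Int) (n1 n2 : Int) (prev : Option Int) (best : Option (Int × Int)),
    (∀ x ∈ L, 2 ≤ x ∧ Nat.Prime x.toNat ∧ left ≤ x ∧ x ≤ right) →
    L.Pairwise (· < ·) →
    prev = ps.getLast? →
    (∀ p, prev = some p → left ≤ p ∧ 2 ≤ p ∧ Nat.Prime p.toNat ∧ ∀ x ∈ L, p < x) →
    (match best with
     | none => ps.length ≤ 1 ∧ n1 = left - 1 ∧ n2 = right + 1
     | some b => (n1, n2) = b ∧ left ≤ b.1 ∧ b.1 < b.2 ∧ b.2 ≤ right ∧ 3 ≤ b.2 - b.1) →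
    pvA3 left right L ps n1 n2 = pvFinish (pvB3 L prev best) := by
  intro L
  induction L with
  | nil =>
    intro ps n1 n2 prev best _ _ _ _ hI4
    cases best with
    | none =>
      obtain ⟨_, h1, h2⟩ := hI4
      simp only [pvA3, pvB3, pvFinish]
      rw [if_pos (by omega)]
    | some b =>
      obtain ⟨b1, b2⟩ := b
      obtain ⟨hb, hbl, hblt, hbr, _⟩ := hI4
      injection hb with e1 e2
      subst e1; subst e2
      dsimp only at hbl hbr
      simp only [pvA3, pvB3, pvFinish]
      rw [if_neg (by omega)]
  | cons k ks ih =>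
    intro ps n1 n2 prev best hI1 hI2 hI3 hprev hI4
    obtain ⟨hk2, hkp, hkl, hkr⟩ := hI1 k (List.mem_cons_self)
    have hI1' : ∀ x ∈ ks, 2 ≤ x ∧ Nat.Prime x.toNat ∧ left ≤ x ∧ x ≤ right :=
      fun x hx => hI1 x (List.mem_cons_of_mem _ hx)
    have hpw := List.pairwise_cons.1 hI2
    by_cases hps : ps = []
    · subst hps
      have hprevn : prev = none := by simpa using hI3
      subst hprevn
      simp only [pvA3, pvB3, List.nil_append, List.length_cons, List.length_nil]
      rw [if_neg (by omega)]
      refine ih [k] n1 n2 (some k) best hI1' hpw.2 (by simp)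
        (by rintro p hp; cases hp; exact ⟨hkl, hk2, hkp, fun x hx => hpw.1 x hx⟩) ?_
      cases best with
      | none => obtain ⟨_, h1, h2⟩ := hI4; exact ⟨by simp, h1, h2⟩
      | some b => exact hI4
    · have hlps : 1 ≤ ps.length := by
        cases ps with
        | nil => exact absurd rfl hps
        | cons a l => simp
      have hprevp : prev = some (ps.getLast hps) := by
        rw [hI3]; exact List.getLast?_eq_some_getLast hps
      obtain ⟨hpl, hp2, hpp, hplt⟩ := hprev (ps.getLast hps) hprevp
      have hpk : ps.getLast hps < k := hplt k (List.mem_cons_self)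
      have hlen2 : 2 ≤ (ps ++ [k]).length := by simp; omega
      have hlen1 : 1 < (ps ++ [k]).length := by simp; omega
      have hidx : (ps ++ [k]).length - 2 = ps.length - 1 := by simp
      have hlt' : ps.length - 1 < ps.length := by omega
      have hg1 : PySem.List.pyGetD (ps ++ [k]) (-1) 0 = k :=
        PySem.List.pyGetD_neg_one_append_singleton ps k 0
      have hg2 : PySem.List.pyGetD (ps ++ [k]) (-2) 0 = ps.getLast hps := by
        rw [PySem.List.pyGetD_neg_ofNat (ps ++ [k]) 2 0 (by norm_num) hlen2,
            ← List.getD_eq_getElem _ 0, hidx,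
            List.getD_eq_getElem _ 0 (show ps.length - 1 < (ps ++ [k]).length by simp),
            List.getElem_append_left hlt', ← List.getLast_eq_getElem]
      have hslice : PySem.List.slice (ps ++ [k]) (some (-2)) none = [ps.getLast hps, k] := by
        rw [PySem.List.slice_from_neg_ofNat (ps ++ [k]) 2 (by norm_num), hidx,
            List.drop_append_of_le_length (by omega), List.drop_length_sub_one hps]
        rfl
      simp only [pvA3, pvB3, hprevp, hg1, hg2]
      rw [if_pos hlen1]
      cases best with
      | none =>
        obtain ⟨hps1, h1, h2⟩ := hI4
        by_cases hd3 : k - ps.getLast hps < 3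
        · rw [if_pos hd3, hslice]
          rw [pvB3_stuck ks k (ps.getLast hps, k) (by omega) hkp (by dsimp; omega)
            (fun x hx => ⟨hpw.1 x hx, (hI1' x hx).2.1⟩) hpw.2]
          rfl
        · rw [if_neg hd3]
          have hup : k - ps.getLast hps < n2 - n1 := by omega
          rw [if_pos hup]
          exact ih (ps ++ [k]) (ps.getLast hps) k (some k) (some (ps.getLast hps, k)) hI1'
            hpw.2 (List.getLast?_concat).symm
            (by rintro q hq; cases hq; exact ⟨hkl, hk2, hkp, fun x hx => hpw.1 x hx⟩)
            ⟨rfl, hpl, hpk, hkr, by omega⟩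
      | some b =>
        obtain ⟨b1, b2⟩ := b
        obtain ⟨hb, hbl, hblt, hbr, hb3⟩ := hI4
        injection hb with e1 e2
        subst e1; subst e2
        dsimp only at hbl hbr hb3 ⊢
        by_cases hd3 : k - ps.getLast hps < 3
        · rw [if_pos hd3, hslice]
          rw [if_pos (show k - ps.getLast hps < n2 - n1 by omega)]
          rw [pvB3_stuck ks k (ps.getLast hps, k) (by omega) hkp (by dsimp; omega)
            (fun x hx => ⟨hpw.1 x hx, (hI1' x hx).2.1⟩) hpw.2]
          rfl
        · rw [if_neg hd3]
          by_cases hup : k - ps.getLast hps < n2 - n1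
          · rw [if_pos hup, if_pos hup]
            exact ih (ps ++ [k]) (ps.getLast hps) k (some k) (some (ps.getLast hps, k)) hI1'
              hpw.2 (List.getLast?_concat).symm
              (by rintro q hq; cases hq; exact ⟨hkl, hk2, hkp, fun x hx => hpw.1 x hx⟩)
              ⟨rfl, hpl, hpk, hkr, by omega⟩
          · rw [if_neg hup, if_neg hup]
            exact ih (ps ++ [k]) n1 n2 (some k) (some (n1, n2)) hI1'
              hpw.2 (List.getLast?_concat).symm
              (by rintro q hq; cases hq; exact ⟨hkl, hk2, hkp, fun x hx => hpw.1 x hx⟩)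
              ⟨rfl, hbl, hblt, hbr, hb3⟩

-- ===== VERDICT (by name: the statement is the Claim_ definition above) =====
theorem closestPrimes_spec : Claim_equal_closestPrimes := by
  unfold Claim_equal_closestPrimes
  intro left right _ hpre
  unfold Pre_closestPrimes at hpre
  unfold Spec_closestPrimes
  show closestPrimes left right = closestPrimes_alt left right
  have h2 : 2 ≤ (right + 1).toNat := by omega
  have step1 : closestPrimes left right
      = pvA3 left right
          ((List.range' 0 (right + 1).toNat).filterMap
            (fun k => if pvCond left k then some ((k : Int)) else none))
          [] (left - 1) (right + 1) := by
    show pvALoop left right ((right + 1).toNat) (List.range' 0 ((right + 1).toNat))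
        (((Array.replicate ((right + 1).toNat) true).setIfInBounds 0 false).setIfInBounds 1 false)
        [] (left - 1) (right + 1) = _
    rw [pvALoop_toList]
    have hinit : ((((Array.replicate ((right + 1).toNat) true).setIfInBounds 0 false).setIfInBounds
          1 false)).toList = pvInit ((right + 1).toNat) := by
      simp [pvInit, Array.toList_setIfInBounds, Array.toList_replicate]
    rw [hinit]
    exact pvALoop_eq_pvA3 left right _ h2 _ 0 [] _ _ (by omega)
  have step2 : pvA3 left right
      ((List.range' 0 (right + 1).toNat).filterMap
        (fun k => if pvCond left k then some ((k : Int)) else none))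
      [] (left - 1) (right + 1)
      = pvFinish (pvB3
          ((List.range' 0 (right + 1).toNat).filterMap
            (fun k => if pvCond left k then some ((k : Int)) else none)) none none) :=
    pvA3_eq_pvB3 left right _ [] (left - 1) (right + 1) none none
      (mem_A_list left right hpre) (pairwise_A_list left right) rfl
      (by intro p hp; exact absurd hp (by simp)) ⟨by simp, rfl, rfl⟩
  rw [step1, step2, ← lists_eq left right hpre, ← pvBLoop_eq_pvB3]
  unfold closestPrimes_alt
  cases h : pvBLoop (PySem.List.pyRange (max left 2) (right + 1) 1) none none with
  | none => rfl
  | some b => rfl
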